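-- pv_equiv track=rewrite | github.com/dyeap-zz/CS_Practice | Facebook/SlowSums.py | slowsum
-- ===== SOURCE A (Python) =====
-- def slowsum(arr):
--     arr.sort()
--     n = len(arr)
--     # add the left two numbers
--     if n < 2:
--         return 0
--     i, j = 2, n-3
--     res = (arr[-1] + arr[-2])*(n-1) # 7*3 + 2*2 + 3*1
--
--     while j >= 0: # 0
--         res += arr[j]*(n-i)
--         # update
--         j -= 1
--         i += 1 # 3
--     return res
-- ===== SOURCE B (Python) =====
-- def slowsum(arr):
--     arr.sort()
--     n = len(arr)
--     if n < 2:
--         return 0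
--     running = arr[-1] + arr[-2]
--     cost = running
--     for x in reversed(arr[:-2]):
--         running += x
--         cost += running
--     return cost
-- ===== Notes on version B (the rewrite author's own statement) =====
-- stated objective: simpler
-- what changed: Replaces A's per-index weight multiplication (arr[j]*(n-i) with two counters i,j) by a single running cumulative sum accumulated into the cost while iterating the sorted prefix back-to-front.
import Mathlib
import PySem

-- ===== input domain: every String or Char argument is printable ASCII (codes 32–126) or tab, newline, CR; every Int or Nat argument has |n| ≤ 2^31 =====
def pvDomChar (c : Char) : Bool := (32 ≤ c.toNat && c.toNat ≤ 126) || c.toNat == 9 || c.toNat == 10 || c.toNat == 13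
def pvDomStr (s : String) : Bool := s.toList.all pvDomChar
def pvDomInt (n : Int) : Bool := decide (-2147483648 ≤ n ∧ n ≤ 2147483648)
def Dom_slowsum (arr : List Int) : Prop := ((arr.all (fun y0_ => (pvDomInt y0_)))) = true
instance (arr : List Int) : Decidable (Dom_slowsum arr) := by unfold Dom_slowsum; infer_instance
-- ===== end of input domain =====

-- B replaces A's per-index weight multiplication by a running cumulative-sum accumulation
-- (same mutation: both sort the argument in place; equivalence is about the return value).

-- ===== PORT A =====
-- while j >= 0: res += arr[j]*(n-i); j -= 1; i += 1
def slowsumLoop (s : List Int) (n j i res : Int) : Int :=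
  if _h : j ≥ 0 then
    slowsumLoop s n (j - 1) (i + 1) (res + (PySem.List.pyGetD s j 0) * (n - i))
  else res
termination_by (j + 1).toNat
decreasing_by omega

def slowsum (arr : List Int) : Int :=
  let s := PySem.List.sorted arr (fun x => x) false
  let n : Int := s.length
  if n < 2 then 0
  else
    slowsumLoop s n (n - 3) 2
      ((PySem.List.pyGetD s (-1) 0 + PySem.List.pyGetD s (-2) 0) * (n - 1))

-- ===== PORT B =====
def slowsum_alt (arr : List Int) : Int :=
  let s := PySem.List.sorted arr (fun x => x) false
  let n : Int := s.length
  if n < 2 then 0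
  else
    let r0 := PySem.List.pyGetD s (-1) 0 + PySem.List.pyGetD s (-2) 0
    ((PySem.List.slice s none (some (-2))).reverse.foldl
        (fun rc x => (rc.1 + x, rc.2 + rc.1 + x)) (r0, r0)).2

-- ===== PRECONDITION & SPEC =====
def Spec_slowsum (arr : List Int) (out : Int) : Prop := out = slowsum_alt arr
instance (arr : List Int) (out : Int) : Decidable (Spec_slowsum arr out) := by unfold Spec_slowsum; infer_instance

-- ===== CLAIM (what is proved, stated in full; the proofs are below) =====
def Claim_equal_slowsum : Prop := ∀ (arr : List Int), Dom_slowsum arr → Spec_slowsum arr (slowsum arr)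

-- ===== LEMMAS AND PROOFS =====
-- weighted sum: wsum [a,b,c] w = a*w + b*(w+1) + c*(w+2)
def wsum : List Int → Int → Int
  | [], _ => 0
  | x :: l, w => x * w + wsum l (w + 1)

-- running cumulative-sum cost: fsum [a,b] r = (r+a) + ((r+a)+b)
def fsum : List Int → Int → Int
  | [], _ => 0
  | x :: l, r => (r + x) + fsum l (r + x)

theorem wsum_append (l : List Int) (x w : Int) :
    wsum (l ++ [x]) w = wsum l w + x * (w + l.length) := by
  induction l generalizing w with
  | nil => simp [wsum]
  | cons y l ih => simp [wsum, ih]; ring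

theorem loop_eq (k : Nat) (s : List Int) (n res : Int) (hk : k ≤ s.length) :
    slowsumLoop s n ((k : Int) - 1) (n - k) res = res + wsum (s.take k) 1 := by
  induction k generalizing res with
  | zero => rw [slowsumLoop]; simp [wsum]
  | succ k ih =>
    rw [slowsumLoop]
    have hlt : k < s.length := by omega
    have hget : PySem.List.pyGetD s ((k : Int) + 1 - 1) 0 = s[k] := by
      rw [show ((k : Int) + 1 - 1) = ((k : Nat) : Int) from by ring, PySem.List.pyGetD_natCast]
      simp [List.getD, hlt]
    have htake : s.take (k + 1) = s.take k ++ [s[k]] := by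
      rw [List.take_add_one]
      simp [hlt]
    push_cast
    rw [dif_pos (show (0:Int) ≤ (k : Int) + 1 - 1 by omega), hget]
    rw [show ((k : Int) + 1 - 1 - 1) = (k : Int) - 1 from by ring,
        show (n - ((k : Int) + 1) + 1) = n - (k : Int) from by ring]
    have := ih (res := res + s[k] * (n - (n - ((k : Int) + 1)))) (by omega)
    rw [this, htake, wsum_append]
    have hlen : ((s.take k).length : Int) = (k : Int) := by
      simp [List.length_take]; omega
    rw [hlen]
    ring

theorem fold_snd (l : List Int) (r c : Int) :
    (l.foldl (fun rc x => (rc.1 + x, rc.2 + rc.1 + x)) (r, c)).2 = c + fsum l r := by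
  induction l generalizing r c with
  | nil => simp [fsum]
  | cons x l ih => simp [List.foldl, fsum, ih]; ring

theorem fsum_rev (l : List Int) (r : Int) :
    fsum l r = r * l.length + wsum l.reverse 1 := by
  induction l generalizing r with
  | nil => simp [fsum, wsum]
  | cons x l ih =>
    simp only [fsum, ih, List.reverse_cons, wsum_append, List.length_reverse,
      List.length_cons]
    push_cast
    ring

-- ===== VERDICT (by name: the statement is the Claim_ definition above) =====
theorem slowsum_spec : Claim_equal_slowsum := by
  intro arr _
  unfold Spec_slowsum slowsum slowsum_alt
  set s := PySem.List.sorted arr (fun x => x) false with hs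
  simp only []
  by_cases h : (s.length : Int) < 2
  · rw [if_pos h, if_pos h]
  · rw [if_neg h, if_neg h]
    have h2 : 2 ≤ s.length := by omega
    set r0 := PySem.List.pyGetD s (-1) 0 + PySem.List.pyGetD s (-2) 0 with hr0
    -- slice s [:-2] = take (length - 2)
    rw [PySem.List.slice_to_neg_ofNat s 2 (by omega)]
    rw [fold_snd, fsum_rev, List.reverse_reverse]
    have hklen : ((s.take (s.length - 2)).reverse.length : Int) = (s.length : Int) - 2 := by
      simp [List.length_take]
      omega
    rw [hklen]
    have hcast : ((s.length - 2 : Nat) : Int) - 1 = (s.length : Int) - 3 := by omega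
    have hi : (s.length : Int) - ((s.length - 2 : Nat) : Int) = 2 := by omega
    have := loop_eq (s.length - 2) s (s.length : Int)
      (r0 * ((s.length : Int) - 1)) (by omega)
    rw [hcast, hi] at this
    rw [this]
    ring
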